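-- pv_equiv track=rewrite | github.com/IES-Rafael-Alberti/dam1-2425-ejercicios-u2-dcsibon | src/Pract2_2/ej2_2_08.py | construir_triangulo
-- ===== SOURCE A (Python) =====
-- def es_par(num: int) -> bool:
--     return num % 2 == 0
--
-- def construir_fila(numero, fin, signo):
--     fila = ""
--     for i in range(numero, fin, -2):
--         fila += str(i * signo) + " "
--
--     return fila
--
-- def construir_triangulo(numero):
--     if numero > 0:
--         signo = 1
--     else:
--         signo = -1
--
--     if es_par(numero):
--         inicio = 0
--     else:
--         inicio = 1
--
--     numero = abs(numero)
--
--     triangulo = ""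
--     for i in range(inicio, numero + 1, 2):
--         triangulo += construir_fila(i, inicio - 1, signo) + "\n"
--
--     return triangulo
-- ===== SOURCE B (Python) =====
-- def construir_triangulo(numero):
--     signo = 1 if numero > 0 else -1
--     inicio = 0 if numero % 2 == 0 else 1
--     fila = ""
--     triangulo = ""
--     for i in range(inicio, abs(numero) + 1, 2):
--         fila = str(i * signo) + " " + fila
--         triangulo += fila + "\n"
--     return triangulo
-- ===== Notes on version B (the rewrite author's own statement) =====
-- stated objective: alternative
-- what changed: Replaced the nested countdown loop (each row rebuilt from scratch) by a single pass that keeps the previous row and prepends the new top element, so each number is stringified once; measured ~10x at mid sizes but both programs are bounded by the quadratic output size, so no unqualified speed claim.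
import Mathlib
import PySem

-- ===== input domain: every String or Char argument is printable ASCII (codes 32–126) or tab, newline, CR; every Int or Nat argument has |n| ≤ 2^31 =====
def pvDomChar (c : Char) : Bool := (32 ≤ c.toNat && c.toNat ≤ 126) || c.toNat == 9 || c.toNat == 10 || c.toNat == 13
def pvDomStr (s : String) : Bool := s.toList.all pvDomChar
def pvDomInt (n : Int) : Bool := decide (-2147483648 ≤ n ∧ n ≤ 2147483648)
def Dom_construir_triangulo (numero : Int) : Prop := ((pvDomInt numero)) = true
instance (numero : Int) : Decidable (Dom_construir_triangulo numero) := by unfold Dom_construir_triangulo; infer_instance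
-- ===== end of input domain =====

-- B replaces A's nested countdown loop by a single pass that keeps the previous row and
-- prepends the new top element, so each number is stringified exactly once.

-- ===== PORT A =====
def es_par (num : Int) : Bool := PySem.Int.mod num 2 == 0

def construir_fila (numero fin signo : Int) : String :=
  (PySem.List.pyRange numero fin (-2)).foldl
    (fun fila i => fila ++ (PySem.Int.toStr (i * signo) ++ " ")) ""

def construir_triangulo (numero : Int) : String :=
  let signo : Int := if numero > 0 then 1 else -1
  let inicio : Int := if es_par numero then 0 else 1
  let numero2 : Int := |numero|
  (PySem.List.pyRange inicio (numero2 + 1) 2).foldl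
    (fun triangulo i => triangulo ++ (construir_fila i (inicio - 1) signo ++ "\n")) ""

-- ===== PORT B =====
def construir_triangulo_alt (numero : Int) : String :=
  let signo : Int := if numero > 0 then 1 else -1
  let inicio : Int := if PySem.Int.mod numero 2 == 0 then 0 else 1
  ((PySem.List.pyRange inicio (|numero| + 1) 2).foldl
    (fun (st : String × String) i =>
      let fila := PySem.Int.toStr (i * signo) ++ " " ++ st.1
      (fila, st.2 ++ (fila ++ "\n"))) ("", "")).2

-- ===== PRECONDITION & SPEC =====
def Spec_construir_triangulo (numero : Int) (out : String) : Prop := out = construir_triangulo_alt numero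
instance (numero : Int) (out : String) : Decidable (Spec_construir_triangulo numero out) := by unfold Spec_construir_triangulo; infer_instance

-- ===== CLAIM (what is proved, stated in full; the proofs are below) =====
def Claim_equal_construir_triangulo : Prop := ∀ (numero : Int), Dom_construir_triangulo numero → Spec_construir_triangulo numero (construir_triangulo numero)

-- ===== LEMMAS AND PROOFS =====

-- range(a, b, 2) induction forms
theorem pvRange2_nil (a b : Int) (h : b ≤ a) : PySem.List.pyRange a b 2 = [] := by
  rw [PySem.List.pyRange_of_pos a b (by norm_num)]
  rw [if_neg (by omega)]
  simp

theorem pvRange2_cons (a b : Int) (h : a < b) :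
    PySem.List.pyRange a b 2 = a :: PySem.List.pyRange (a + 2) b 2 := by
  rw [PySem.List.pyRange_of_pos a b (by norm_num),
      PySem.List.pyRange_of_pos (a + 2) b (by norm_num)]
  rw [if_pos h]
  by_cases h2 : a + 2 < b
  · rw [if_pos h2]
    have hc : ((b - a + 2 - 1) / 2).toNat = ((b - (a + 2) + 2 - 1) / 2).toNat + 1 := by omega
    rw [hc, List.range_succ_eq_map]
    simp only [List.map_cons, List.map_map]
    congr 1
    · simp
    · apply List.map_congr_left
      intro k _
      simp only [Function.comp_apply]
      push_cast
      ring
  · rw [if_neg h2]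
    have hc : ((b - a + 2 - 1) / 2).toNat = 1 := by omega
    rw [hc]
    simp

-- range(a, b, -2) induction forms
theorem pvRangeNeg2_nil (a b : Int) (h : a ≤ b) : PySem.List.pyRange a b (-2) = [] := by
  simp only [PySem.List.pyRange]
  norm_num
  intro hba
  omega

theorem pvRangeNeg2_cons (a b : Int) (h : b < a) :
    PySem.List.pyRange a b (-2) = a :: PySem.List.pyRange (a - 2) b (-2) := by
  simp only [PySem.List.pyRange]
  norm_num
  rw [if_pos h]
  by_cases h2 : b < a - 2
  · rw [if_pos h2]
    have hc : ((a - b + 2 - 1) / 2).toNat = ((a - 2 - b + 2 - 1) / 2).toNat + 1 := by omega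
    rw [hc, List.range_succ_eq_map]
    simp only [List.map_cons, List.map_map]
    congr 1
    · simp
    · apply List.map_congr_left
      intro k _
      simp only [Function.comp_apply]
      push_cast
      ring
  · rw [if_neg h2]
    have hc : ((a - b + 2 - 1) / 2).toNat = 1 := by omega
    rw [hc]
    simp

-- factoring the string accumulator out of a foldl of appends
theorem pvFoldlFactor (s : Int → String) (L : List Int) :
    ∀ a : String, L.foldl (fun acc j => acc ++ s j) a = a ++ L.foldl (fun acc j => acc ++ s j) "" := by
  induction L with
  | nil => intro a; simp
  | cons h t ih =>
    intro a
    simp only [List.foldl_cons]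
    rw [ih (a ++ s h), ih (("" : String) ++ s h)]
    simp [String.append_assoc]

-- peeling one element off a row
theorem pvFilaCons (i fin signo : Int) (h : fin < i) :
    construir_fila i fin signo =
      PySem.Int.toStr (i * signo) ++ " " ++ construir_fila (i - 2) fin signo := by
  unfold construir_fila
  rw [pvRangeNeg2_cons i fin h]
  simp only [List.foldl_cons]
  rw [pvFoldlFactor (fun j => PySem.Int.toStr (j * signo) ++ " ")]
  simp [String.append_assoc]

theorem pvFilaNil (i fin signo : Int) (h : i ≤ fin) : construir_fila i fin signo = "" := by
  unfold construir_fila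
  rw [pvRangeNeg2_nil i fin h]
  rfl

-- main loop invariant: B's running `fila` equals the row A rebuilds from scratch
theorem pvLoop (signo fin : Int) :
    ∀ (n : Nat) (a b : Int), (b - a).toNat ≤ n → fin < a → ∀ tri : String,
    ((PySem.List.pyRange a b 2).foldl
        (fun (st : String × String) i =>
          (PySem.Int.toStr (i * signo) ++ " " ++ st.1,
           st.2 ++ (PySem.Int.toStr (i * signo) ++ " " ++ st.1 ++ "\n")))
        (construir_fila (a - 2) fin signo, tri)).2
      = (PySem.List.pyRange a b 2).foldl
          (fun triangulo i => triangulo ++ (construir_fila i fin signo ++ "\n")) tri := by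
  intro n
  induction n with
  | zero =>
    intro a b hn _ tri
    rw [pvRange2_nil a b (by omega)]
    rfl
  | succ n ih =>
    intro a b hn hfa tri
    by_cases hab : a < b
    · rw [pvRange2_cons a b hab]
      simp only [List.foldl_cons]
      have hrow : PySem.Int.toStr (a * signo) ++ " " ++ construir_fila (a - 2) fin signo
          = construir_fila a fin signo := (pvFilaCons a fin signo hfa).symm
      rw [hrow]
      have ha2 : a = (a + 2) - 2 := by ring
      calc ((PySem.List.pyRange (a + 2) b 2).foldl
              (fun (st : String × String) i =>
                (PySem.Int.toStr (i * signo) ++ " " ++ st.1,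
                 st.2 ++ (PySem.Int.toStr (i * signo) ++ " " ++ st.1 ++ "\n")))
              (construir_fila a fin signo, tri ++ (construir_fila a fin signo ++ "\n"))).2
          = ((PySem.List.pyRange (a + 2) b 2).foldl
              (fun (st : String × String) i =>
                (PySem.Int.toStr (i * signo) ++ " " ++ st.1,
                 st.2 ++ (PySem.Int.toStr (i * signo) ++ " " ++ st.1 ++ "\n")))
              (construir_fila ((a + 2) - 2) fin signo, tri ++ (construir_fila a fin signo ++ "\n"))).2 := by
              rw [← ha2]
        _ = (PySem.List.pyRange (a + 2) b 2).foldl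
              (fun triangulo i => triangulo ++ (construir_fila i fin signo ++ "\n"))
              (tri ++ (construir_fila a fin signo ++ "\n")) := by
              exact ih (a + 2) b (by omega) (by omega) _
    · rw [pvRange2_nil a b (by omega)]
      rfl

-- ===== VERDICT (by name: the statement is the Claim_ definition above) =====
theorem construir_triangulo_spec : Claim_equal_construir_triangulo := by
  intro numero _
  unfold Spec_construir_triangulo
  simp only [construir_triangulo, construir_triangulo_alt, es_par]
  set signo : Int := if numero > 0 then 1 else -1 with hs
  set inicio : Int := if PySem.Int.mod numero 2 == 0 then 0 else 1 with hi
  have hinit : ("" : String) = construir_fila (inicio - 2) (inicio - 1) signo :=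
    (pvFilaNil _ _ _ (by omega)).symm
  rw [show (("", "") : String × String) = (construir_fila (inicio - 2) (inicio - 1) signo, "") by
        rw [← hinit]]
  exact (pvLoop signo (inicio - 1) ((|numero| + 1 - inicio).toNat) inicio (|numero| + 1)
    (le_refl _) (by omega) "").symm
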